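-- pv_equiv track=rewrite | github.com/pymft/mft-vanak-2020 | S17/files_everywhere/main2.py | get_parent_to_children
-- ===== SOURCE A (Python) =====
-- def get_parent_to_children(p2c):
--     out = {}
--
--     for k, v in p2c.items():
--         if k not in out:
--             out[k] = []
--
--         if v not in out:
--             out[v] = []
--
--         out[v].append(k)
--
--     return out
-- ===== SOURCE B (Python) =====
-- def get_parent_to_children(p2c):
--     # Gather nodes in first-appearance order (key before its value),
--     # then build each child list independently by a per-node filter over
--     # p2c: no dict mutation, no appending.
--     items = list(p2c.items())
--     nodes = dict.fromkeys(n for kv in items for n in kv)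
--     return {n: [k for k, v in items if v == n] for n in nodes}
-- ===== Notes on version B (the rewrite author's own statement) =====
-- stated objective: alternative
-- what changed: Replaces A's single mutating insert-and-append loop with a node-enumeration pass followed by a comprehension that computes each node's child list by filtering p2c for entries whose value equals that node; no dict mutation or appending at all.
import Mathlib
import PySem

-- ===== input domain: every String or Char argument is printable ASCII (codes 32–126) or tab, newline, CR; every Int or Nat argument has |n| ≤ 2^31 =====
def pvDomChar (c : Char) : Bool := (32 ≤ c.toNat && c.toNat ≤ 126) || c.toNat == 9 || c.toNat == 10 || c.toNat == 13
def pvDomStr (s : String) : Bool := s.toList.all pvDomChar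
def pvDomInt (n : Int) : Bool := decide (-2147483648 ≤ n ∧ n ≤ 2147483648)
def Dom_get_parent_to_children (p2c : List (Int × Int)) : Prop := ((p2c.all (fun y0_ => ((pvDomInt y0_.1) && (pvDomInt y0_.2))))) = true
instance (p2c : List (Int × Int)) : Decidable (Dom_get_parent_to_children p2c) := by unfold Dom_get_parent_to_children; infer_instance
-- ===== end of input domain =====

-- B replaces A's mutating insert-and-append loop by a node enumeration plus a per-node filter comprehension; same return value.

-- ===== PORT A =====
-- one loop: insert k and v with [] when missing, then out[v].append(k)
def get_parent_to_children (p2c : List (Int × Int)) : List (Int × List Int) :=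
  (p2c.foldl (fun out kv =>
      let out := if out.contains kv.1 then out else out.insert kv.1 []
      let out := if out.contains kv.2 then out else out.insert kv.2 []
      out.modify kv.2 [] (fun l => l ++ [kv.1]))
    PySem.Dict.empty).items

-- ===== PORT B =====
-- nodes in first-appearance order, then a comprehension: each node's children = filter of p2c
def get_parent_to_children_alt (p2c : List (Int × Int)) : List (Int × List Int) :=
  let nodes : PySem.Set Int := PySem.Set.ofList (p2c.flatMap (fun kv => [kv.1, kv.2]))
  nodes.map (fun n => (n, (p2c.filter (fun kv => kv.2 == n)).map (·.1)))

-- ===== PRECONDITION & SPEC =====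
def Spec_get_parent_to_children (p2c : List (Int × Int)) (out : List (Int × List Int)) : Prop := out = get_parent_to_children_alt p2c
instance (p2c : List (Int × Int)) (out : List (Int × List Int)) : Decidable (Spec_get_parent_to_children p2c out) := by unfold Spec_get_parent_to_children; infer_instance

-- ===== CLAIM =====
def Claim_equal_get_parent_to_children : Prop := ∀ (p2c : List (Int × Int)), Dom_get_parent_to_children p2c → Spec_get_parent_to_children p2c (get_parent_to_children p2c)

-- ===== LEMMAS AND PROOFS =====

-- insert-if-missing with [] never changes getD _ []
theorem pv_getD_ins (d : PySem.Dict Int (List Int)) (k c : Int) :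
    (if d.contains k then d else d.insert k []).getD c [] = d.getD c [] := by
  split
  · rfl
  · rename_i h
    rw [PySem.Dict.getD_insert]
    split
    · rename_i hc; subst hc
      rw [PySem.Dict.getD_of_not_contains d [] (by simpa using h)]
    · rfl

-- keys of insert-if-missing = Set.add
theorem pv_keys_ins (d : PySem.Dict Int (List Int)) (k : Int) :
    (if d.contains k then d else d.insert k []).keys = PySem.Set.add d.keys k := by
  rw [PySem.Set.add_eq_ite]
  by_cases h : d.contains k = true
  · rw [if_pos h, if_pos]
    exact (PySem.Dict.contains_iff_mem_keys d k).mp h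
  · rw [if_neg h, if_neg, PySem.Dict.keys_insert_of_not_contains d [] (by simpa using h)]
    intro hm; exact h ((PySem.Dict.contains_iff_mem_keys d k).mpr hm)

-- insert-if-missing contains its key afterwards
theorem pv_contains_ins_self (d : PySem.Dict Int (List Int)) (k : Int) :
    (if d.contains k then d else d.insert k []).contains k = true := by
  split
  · assumption
  · exact PySem.Dict.contains_insert_self d k []

-- A's loop: getD characterisation
theorem pv_getD_A (xs : List (Int × Int)) (d : PySem.Dict Int (List Int)) (c : Int) :
    (xs.foldl (fun out kv =>
        let out := if out.contains kv.1 then out else out.insert kv.1 []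
        let out := if out.contains kv.2 then out else out.insert kv.2 []
        out.modify kv.2 [] (fun l => l ++ [kv.1])) d).getD c []
      = d.getD c [] ++ (xs.filter (fun kv => kv.2 == c)).map (·.1) := by
  induction xs generalizing d with
  | nil => simp
  | cons kv xs ih =>
    simp only [List.foldl_cons, ih, List.filter_cons]
    rw [PySem.Dict.getD_modify]
    by_cases hc : c = kv.2
    · subst hc
      simp [pv_getD_ins]
    · rw [if_neg hc, pv_getD_ins, pv_getD_ins,
        if_neg (by simpa using (fun h => hc h.symm))]

-- A's loop: keys characterisation
theorem pv_keys_A (xs : List (Int × Int)) (d : PySem.Dict Int (List Int)) :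
    (xs.foldl (fun out kv =>
        let out := if out.contains kv.1 then out else out.insert kv.1 []
        let out := if out.contains kv.2 then out else out.insert kv.2 []
        out.modify kv.2 [] (fun l => l ++ [kv.1])) d).keys
      = PySem.Set.update d.keys (xs.flatMap (fun kv => [kv.1, kv.2])) := by
  induction xs generalizing d with
  | nil => simp [PySem.Set.update]
  | cons kv xs ih =>
    simp only [List.foldl_cons, List.flatMap_cons, ih]
    rw [PySem.Dict.keys_modify,
      PySem.Dict.keys_insert_of_contains _ _ (pv_contains_ins_self _ kv.2),
      pv_keys_ins, pv_keys_ins, List.cons_append, List.cons_append, List.nil_append,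
      PySem.Set.update_cons, PySem.Set.update_cons]

-- ===== VERDICT =====
theorem get_parent_to_children_spec : Claim_equal_get_parent_to_children := by
  intro p2c _
  unfold Spec_get_parent_to_children
  simp only [get_parent_to_children, get_parent_to_children_alt]
  have hnd : (PySem.Set.ofList (p2c.flatMap (fun kv => [kv.1, kv.2]))).Nodup :=
    PySem.Set.nodup_ofList _
  have hkA := pv_keys_A p2c PySem.Dict.empty
  rw [PySem.Dict.keys_empty, PySem.Set.update_nil_left] at hkA
  rw [PySem.Dict.items_eq_map_keys _ (by rw [hkA]; exact hnd) [], hkA]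
  apply List.map_congr_left
  intro c _
  rw [pv_getD_A, PySem.Dict.getD_empty, List.nil_append]
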